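-- pv_equiv track=rewrite | github.com/Sukhvansh2004/CP-DSA | sequences.py | f
-- ===== SOURCE A (Python) =====
-- def f(n, k):
--     if k == 1:
--         return list(range(1, n+1))
--     else:
--         arr = f(n, k-1)
--         arr_ = list()
--         for i in arr:
--             l = n//i
--             for j in range(1, l+1):
--                 arr_.append(j*i)
--         return arr_
-- ===== SOURCE B (Python) =====
-- def f(n, k):
--     result = list(range(1, n + 1))
--     for _ in range(k - 1):
--         result = [j * i for i in result for j in range(1, n // i + 1)]
--     return result
-- ===== Notes on version B (the rewrite author's own statement) =====
-- stated objective: simpler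
-- what changed: Replaces top-down recursion with a bottom-up loop: start from range(1,n+1) and apply the multiples-expansion k-1 times via a list comprehension, no recursion and no explicit append loop.
import Mathlib
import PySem

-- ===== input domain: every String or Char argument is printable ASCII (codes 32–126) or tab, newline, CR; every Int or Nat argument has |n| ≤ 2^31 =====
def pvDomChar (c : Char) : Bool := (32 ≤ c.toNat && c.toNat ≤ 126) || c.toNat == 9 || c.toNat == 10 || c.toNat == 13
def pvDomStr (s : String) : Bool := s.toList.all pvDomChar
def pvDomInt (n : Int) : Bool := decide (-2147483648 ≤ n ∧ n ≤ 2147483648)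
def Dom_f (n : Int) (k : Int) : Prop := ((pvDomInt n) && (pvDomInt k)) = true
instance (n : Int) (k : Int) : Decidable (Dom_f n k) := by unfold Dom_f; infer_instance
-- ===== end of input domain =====

-- B replaces A's top-down recursion by a bottom-up iteration (fold over range(k-1))
-- whose step is a flat list comprehension; objective: simpler. A raises RecursionError
-- for k <= 0 (excluded by Pre_f); B's return value only differs from A's there.


-- ===== PORT A =====
-- A's inner double loop: arr_ = []; for i in arr: l = n//i; for j in range(1, l+1): arr_.append(j*i)
def fInner (n : Int) (arr : List Int) : List Int :=
  arr.foldl (fun arr_ i =>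
    let l := PySem.Int.floordiv n i
    (PySem.List.pyRange 1 (l + 1) 1).foldl (fun a j => a ++ [j * i]) arr_) []

-- literal port of A; the 'k ≤ 0' branch is a totality guard only: Python diverges there
-- (RecursionError), which Pre_f excludes.
def f (n : Int) (k : Int) : List Int :=
  if k = 1 then PySem.List.pyRange 1 (n + 1) 1
  else if hk : k ≤ 0 then []
  else fInner n (f n (k - 1))
termination_by k.toNat
decreasing_by omega

-- ===== PORT B =====
def f_alt (n : Int) (k : Int) : List Int :=
  (List.range (k - 1).toNat).foldl
    (fun result _ =>
      result.flatMap (fun i =>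
        (PySem.List.pyRange 1 (PySem.Int.floordiv n i + 1) 1).map (fun j => j * i)))
    (PySem.List.pyRange 1 (n + 1) 1)

-- ===== PRECONDITION & SPEC =====
-- A recurses on k-1 with base case k == 1, so for k ≤ 0 it never terminates (RecursionError).
def Pre_f (n : Int) (k : Int) : Prop := 1 ≤ k
instance (n : Int) (k : Int) : Decidable (Pre_f n k) := by unfold Pre_f; infer_instance
def pvWitness_f : Int × Int := (5, 3)

def Spec_f (n : Int) (k : Int) (out : List Int) : Prop := out = f_alt n k
instance (n : Int) (k : Int) (out : List Int) : Decidable (Spec_f n k out) := by unfold Spec_f; infer_instance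

-- ===== CLAIM (what is proved, stated in full; the proofs are below) =====
def Claim_equal_f : Prop := ∀ (n : Int) (k : Int), Dom_f n k → Pre_f n k → Spec_f n k (f n k)

-- ===== LEMMAS AND PROOFS =====

-- A's innermost append loop is a map appended to the accumulator
theorem inner_loop_eq_map (i : Int) (l : List Int) (acc : List Int) :
    l.foldl (fun a j => a ++ [j * i]) acc = acc ++ l.map (fun j => j * i) := by
  induction l generalizing acc with
  | nil => simp
  | cons x xs ih => simp [List.foldl, ih]

-- A's inner double loop equals B's comprehension (flatMap)
theorem fInner_eq (n : Int) (arr : List Int) :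
    fInner n arr =
      arr.flatMap (fun i =>
        (PySem.List.pyRange 1 (PySem.Int.floordiv n i + 1) 1).map (fun j => j * i)) := by
  unfold fInner
  have hstep : (fun (arr_ : List Int) (i : Int) =>
      (PySem.List.pyRange 1 (PySem.Int.floordiv n i + 1) 1).foldl (fun a j => a ++ [j * i]) arr_)
      = fun (arr_ : List Int) (i : Int) =>
        arr_ ++ (PySem.List.pyRange 1 (PySem.Int.floordiv n i + 1) 1).map (fun j => j * i) := by
    funext arr_ i
    exact inner_loop_eq_map i _ arr_
  rw [hstep, PySem.List.foldl_append_eq_flatMap, List.nil_append]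

theorem f_eq_alt (n : Int) (k : Int) (hk : 1 ≤ k) : f n k = f_alt n k := by
  have key : ∀ m : Nat, f n (1 + m) = f_alt n (1 + m) := by
    intro m
    induction m with
    | zero => simp [f, f_alt]
    | succ m ih =>
      have hc : ((m + 1 : Nat) : Int) = (m : Int) + 1 := by push_cast; ring
      rw [hc, f]
      rw [if_neg (show ¬ ((1 + ((m : Int) + 1)) = 1) by omega),
          dif_neg (show ¬ ((1 + ((m : Int) + 1)) ≤ 0) by omega)]
      rw [show (1 + ((m : Int) + 1) - 1) = 1 + m by ring, ih]
      rw [fInner_eq]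
      unfold f_alt
      rw [show ((1 + ((m : Int) + 1) - 1).toNat) = m + 1 by omega,
          show ((1 + (m : Int) - 1).toNat) = m by omega]
      rw [List.range_succ, List.foldl_append]
      simp only [List.foldl_cons, List.foldl_nil]
  have : k = 1 + (k - 1).toNat := by omega
  rw [this]
  exact key (k - 1).toNat

-- ===== VERDICT (by name: the statement is the Claim_ definition above) =====
theorem f_spec : Claim_equal_f := by
  intro n k _ hk
  exact f_eq_alt n k hk
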